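-- pv_equiv track=rewrite | github.com/root-not-sudo/pyplay | Code Fights/Arcade/The Core/04 - Loop Tunnel/31 - Increase Number Roundness.py | increaseNumberRoundness
-- ===== SOURCE A (Python) =====
-- def increaseNumberRoundness(n):
--     while n % 10 == 0:
--         n = n // 10
--     while n >= 1:
--         if n % 10 == 0:
--             return True
--         n = n // 10
--     return False
-- ===== SOURCE B (Python) =====
-- def increaseNumberRoundness(n):
--     seen_nonzero = False
--     while n >= 1:
--         d = n % 10
--         if d == 0 and seen_nonzero:
--             return True
--         elif d != 0:
--             seen_nonzero = True
--         n = n // 10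
--     return False
-- ===== Notes on version B (the rewrite author's own statement) =====
-- stated objective: simpler
-- what changed: A strips trailing zeros in one loop and then scans for a zero digit in a second loop; B makes a single least-significant-first pass over the digits maintaining a seen_nonzero flag and reports a zero above an already-seen nonzero digit; B also terminates on n=0 where A loops forever (excluded by Pre_).
-- outside the precondition, e.g. on increaseNumberRoundness(0): A does not finish within the time limit, B returns False
import Mathlib
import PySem

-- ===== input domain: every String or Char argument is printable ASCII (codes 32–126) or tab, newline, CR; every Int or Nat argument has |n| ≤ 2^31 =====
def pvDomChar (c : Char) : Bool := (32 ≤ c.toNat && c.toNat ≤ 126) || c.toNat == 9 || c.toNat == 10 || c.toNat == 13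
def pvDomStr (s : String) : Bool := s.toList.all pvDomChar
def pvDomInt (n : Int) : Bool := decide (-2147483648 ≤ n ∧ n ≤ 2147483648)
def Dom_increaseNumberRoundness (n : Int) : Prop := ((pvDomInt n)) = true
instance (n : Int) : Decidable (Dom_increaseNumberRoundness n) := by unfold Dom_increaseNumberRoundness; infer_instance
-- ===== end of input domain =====

-- B fuses A's strip-trailing-zeros loop and its zero-digit scan into one least-significant-first
-- pass with a seen_nonzero flag; Pre_ excludes n = 0, on which A loops forever.


-- ===== PORT A =====
-- first while loop of A: strip trailing zero digits.  The 'n = 0' guard only makes the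
-- recursion total in Lean (Python A loops forever there; n = 0 is outside Pre_).
def stripZerosA (n : Int) : Int :=
  if h0 : n = 0 then 0
  else if PySem.Int.mod n 10 = 0 then stripZerosA (PySem.Int.floordiv n 10)
  else n
termination_by n.natAbs
decreasing_by
  have h : (10 : Int) ∣ n := by
    have := PySem.Int.floordiv_mul_add_mod n 10
    exact ⟨PySem.Int.floordiv n 10, by omega⟩
  obtain ⟨k, hk⟩ := h
  have hfd : PySem.Int.floordiv n 10 = k := by
    have := PySem.Int.floordiv_mul_add_mod n 10
    have hm : PySem.Int.mod n 10 = 0 := by assumption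
    omega
  rw [hfd]
  have hk0 : k ≠ 0 := by intro h; apply h0; omega
  omega

-- second while loop of A: scan the remaining digits for a zero.
def scanZeroA (n : Int) : Bool :=
  if h : n ≥ 1 then
    if PySem.Int.mod n 10 = 0 then true
    else scanZeroA (PySem.Int.floordiv n 10)
  else false
termination_by n.natAbs
decreasing_by
  have h1 : PySem.Int.floordiv n 10 = n / 10 := PySem.Int.floordiv_eq_ediv_of_pos (by omega)
  rw [h1]
  omega

def increaseNumberRoundness (n : Int) : Bool := scanZeroA (stripZerosA n)

-- ===== PORT B =====
-- single pass, least-significant digit first, carrying the seen_nonzero flag.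
def loopB (n : Int) (seen : Bool) : Bool :=
  if h : n ≥ 1 then
    let d := PySem.Int.mod n 10
    if d = 0 ∧ seen = true then true
    else loopB (PySem.Int.floordiv n 10) (if d ≠ 0 then true else seen)
  else false
termination_by n.natAbs
decreasing_by
  have h1 : PySem.Int.floordiv n 10 = n / 10 := PySem.Int.floordiv_eq_ediv_of_pos (by omega)
  rw [h1]
  omega

def increaseNumberRoundness_alt (n : Int) : Bool := loopB n false

-- ===== PRECONDITION & SPEC =====
-- Pre_ excludes only n = 0, on which Python A's first while loop never terminates.
def Pre_increaseNumberRoundness (n : Int) : Prop := n ≠ 0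
instance (n : Int) : Decidable (Pre_increaseNumberRoundness n) := by unfold Pre_increaseNumberRoundness; infer_instance
def pvWitness_increaseNumberRoundness : Int := (105)

def Spec_increaseNumberRoundness (n : Int) (out : Bool) : Prop := out = increaseNumberRoundness_alt n
instance (n : Int) (out : Bool) : Decidable (Spec_increaseNumberRoundness n out) := by unfold Spec_increaseNumberRoundness; infer_instance

-- ===== CLAIM (what is proved, stated in full; the proofs are below) =====
def Claim_equal_increaseNumberRoundness : Prop := ∀ (n : Int), Dom_increaseNumberRoundness n → Pre_increaseNumberRoundness n → Spec_increaseNumberRoundness n (increaseNumberRoundness n)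

-- ===== LEMMAS AND PROOFS =====

-- once a nonzero digit has been seen, B's loop is exactly A's scan loop.
theorem loopB_true_eq_scan (n : Int) : loopB n true = scanZeroA n := by
  by_cases h : n ≥ 1
  · rw [loopB, scanZeroA]
    simp only [dif_pos h]
    by_cases hm : PySem.Int.mod n 10 = 0
    · rw [if_pos ⟨hm, trivial⟩, if_pos hm]
    · rw [if_neg (fun hc => hm hc.1), if_neg hm, if_pos hm]
      exact loopB_true_eq_scan (PySem.Int.floordiv n 10)
  · rw [loopB, scanZeroA]; simp only [dif_neg h]
termination_by n.natAbs
decreasing_by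
  have h1 : PySem.Int.floordiv n 10 = n / 10 := PySem.Int.floordiv_eq_ediv_of_pos (by omega)
  rw [h1]; omega

theorem strip_neg (n : Int) (hn : n < 0) : stripZerosA n < 0 := by
  rw [stripZerosA]
  rw [dif_neg (show ¬ n = 0 by omega)]
  by_cases hm : PySem.Int.mod n 10 = 0
  · rw [if_pos hm]
    have hdvd : (10 : Int) ∣ n := by
      have := PySem.Int.floordiv_mul_add_mod n 10
      exact ⟨PySem.Int.floordiv n 10, by omega⟩
    obtain ⟨k, hk⟩ := hdvd
    have hfd : PySem.Int.floordiv n 10 = k := by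
      have := PySem.Int.floordiv_mul_add_mod n 10
      omega
    rw [hfd]
    exact strip_neg k (by omega)
  · rw [if_neg hm]; exact hn
termination_by n.natAbs
decreasing_by
  omega

theorem main_pos (n : Int) (hn : 0 < n) : scanZeroA (stripZerosA n) = loopB n false := by
  by_cases hm : PySem.Int.mod n 10 = 0
  · -- trailing zero: both sides strip it (seen is still false in B)
    have hdvd : (10 : Int) ∣ n := by
      have := PySem.Int.floordiv_mul_add_mod n 10
      exact ⟨PySem.Int.floordiv n 10, by omega⟩
    obtain ⟨k, hk⟩ := hdvd
    have hfd : PySem.Int.floordiv n 10 = k := by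
      have := PySem.Int.floordiv_mul_add_mod n 10
      omega
    have hk0 : 0 < k := by
      by_contra h
      have : k ≤ 0 := by omega
      nlinarith
    rw [stripZerosA]
    rw [dif_neg (show ¬ n = 0 by omega), if_pos hm, hfd]
    rw [loopB]
    rw [dif_pos (show n ≥ 1 by omega)]
    rw [if_neg (fun hc => Bool.false_ne_true hc.2), if_neg (not_not_intro hm), hfd]
    exact main_pos k hk0
  · -- last digit nonzero: A's strip stops; one scan step matches B's flag flip
    rw [stripZerosA]
    rw [dif_neg (show ¬ n = 0 by omega), if_neg hm]
    rw [scanZeroA, loopB]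
    rw [dif_pos (show n ≥ 1 by omega), dif_pos (show n ≥ 1 by omega)]
    rw [if_neg hm, if_neg (fun hc => hm hc.1), if_pos hm]
    exact (loopB_true_eq_scan (PySem.Int.floordiv n 10)).symm
termination_by n.natAbs
decreasing_by
  omega

-- ===== VERDICT (by name: the statement is the Claim_ definition above) =====
theorem increaseNumberRoundness_spec : Claim_equal_increaseNumberRoundness := by
  intro n _ hpre
  show increaseNumberRoundness n = increaseNumberRoundness_alt n
  unfold increaseNumberRoundness increaseNumberRoundness_alt
  rcases lt_trichotomy n 0 with h | h | h
  · have hs := strip_neg n h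
    rw [scanZeroA, loopB]
    rw [dif_neg (show ¬ stripZerosA n ≥ 1 by omega), dif_neg (show ¬ n ≥ 1 by omega)]
  · exact absurd h hpre
  · exact main_pos n h
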